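-- pv_equiv track=rewrite | github.com/pypi-data/pypi-mirror-399 | packages/gseda/gseda-1.18.0.tar.gz/gseda-1.18.0/src/gseda/ppl/whole_genome_alignment.py | find_uncovered_part
-- ===== SOURCE A (Python) =====
-- def find_uncovered_part(big_interval, merged_intervals):
--     uncovered_parts = []
--     big_start, big_end = big_interval
--
--     # 如果没有合并区间或合并区间为空
--     if not merged_intervals:
--         return [big_interval]
--
--     # 遍历合并区间，计算未被覆盖的部分
--     # 1. 检查大区间开始到第一个合并区间之前的部分
--     if big_start < merged_intervals[0][0]:
--         uncovered_parts.append([big_start, merged_intervals[0][0]])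
--
--     # 2. 检查两个合并区间之间的部分
--     for i in range(1, len(merged_intervals)):
--         prev_end = merged_intervals[i - 1][1]
--         current_start = merged_intervals[i][0]
--
--         if prev_end < current_start:
--             uncovered_parts.append([prev_end, current_start])
--
--     # 3. 检查最后一个合并区间到大区间结束的部分
--     if merged_intervals[-1][1] < big_end:
--         uncovered_parts.append([merged_intervals[-1][1], big_end])
--
--     return uncovered_parts
-- ===== SOURCE B (Python) =====
-- def find_uncovered_part(big_interval, merged_intervals):
--     if not merged_intervals:
--         return [big_interval]
--     big_start, big_end = big_interval
--
--     def gaps(cursor, ivs):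
--         # recursive sweep: cursor is the first position not yet covered
--         if not ivs:
--             return [[cursor, big_end]] if cursor < big_end else []
--         head = ivs[0]
--         tail = gaps(head[1], ivs[1:])
--         return ([[cursor, head[0]]] if cursor < head[0] else []) + tail
--
--     return gaps(big_start, merged_intervals)
-- ===== Notes on version B (the rewrite author's own statement) =====
-- stated objective: alternative
-- what changed: Replaces A's three staged phases over an indexed list (first gap, loop over indices 1..n-1 comparing prev end with current start, last gap) by a recursive cursor sweep: a helper recurses down the interval list carrying the first uncovered position, emitting a gap whenever the cursor is left of the next interval's start and finishing against big_end in its base case.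
import Mathlib
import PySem

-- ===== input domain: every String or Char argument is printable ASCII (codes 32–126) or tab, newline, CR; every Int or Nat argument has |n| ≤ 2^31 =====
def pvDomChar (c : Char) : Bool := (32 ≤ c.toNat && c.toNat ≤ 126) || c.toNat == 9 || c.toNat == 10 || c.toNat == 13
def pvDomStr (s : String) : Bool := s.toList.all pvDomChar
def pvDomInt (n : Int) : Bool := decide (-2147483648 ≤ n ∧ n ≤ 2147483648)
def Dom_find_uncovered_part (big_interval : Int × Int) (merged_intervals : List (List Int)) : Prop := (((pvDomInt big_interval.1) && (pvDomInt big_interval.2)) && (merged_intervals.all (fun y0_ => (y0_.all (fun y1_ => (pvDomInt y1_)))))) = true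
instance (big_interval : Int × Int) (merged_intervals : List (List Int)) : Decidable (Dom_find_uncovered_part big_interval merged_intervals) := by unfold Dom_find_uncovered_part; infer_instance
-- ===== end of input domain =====

-- B replaces A's three staged phases (first gap, indexed interior loop, last gap) by a
-- recursive cursor sweep over the interval list; same return value on Pre_.

-- ===== PORT A =====
def find_uncovered_part (big_interval : Int × Int) (merged_intervals : List (List Int)) : List (List Int) :=
  let big_start := big_interval.1
  let big_end := big_interval.2
  if merged_intervals = [] then
    [[big_start, big_end]]
  else
    -- 1. gap before the first merged interval
    let u0 :=
      if big_start < PySem.List.pyGetD (PySem.List.pyGetD merged_intervals 0 []) 0 0 then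
        [[big_start, PySem.List.pyGetD (PySem.List.pyGetD merged_intervals 0 []) 0 0]]
      else []
    -- 2. for i in range(1, len(merged_intervals)): gaps between consecutive intervals
    let u1 :=
      (PySem.List.pyRange 1 (merged_intervals.length : Int) 1).foldl
        (fun acc i =>
          let prev_end := PySem.List.pyGetD (PySem.List.pyGetD merged_intervals (i - 1) []) 1 0
          let current_start := PySem.List.pyGetD (PySem.List.pyGetD merged_intervals i []) 0 0
          if prev_end < current_start then acc ++ [[prev_end, current_start]] else acc)
        u0
    -- 3. gap after the last merged interval
    if PySem.List.pyGetD (PySem.List.pyGetD merged_intervals (-1) []) 1 0 < big_end then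
      u1 ++ [[PySem.List.pyGetD (PySem.List.pyGetD merged_intervals (-1) []) 1 0, big_end]]
    else u1

-- ===== PORT B =====
-- Source B's inner recursive 'gaps(cursor, ivs)' (big_end captured from the closure)
def pvAltGaps (big_end : Int) (cursor : Int) (ivs : List (List Int)) : List (List Int) :=
  match ivs with
  | [] => if cursor < big_end then [[cursor, big_end]] else []
  | head :: rest =>
    let tail := pvAltGaps big_end (PySem.List.pyGetD head 1 0) rest
    (if cursor < PySem.List.pyGetD head 0 0 then [[cursor, PySem.List.pyGetD head 0 0]] else []) ++ tail

def find_uncovered_part_alt (big_interval : Int × Int) (merged_intervals : List (List Int)) : List (List Int) :=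
  if merged_intervals = [] then
    [[big_interval.1, big_interval.2]]
  else
    pvAltGaps big_interval.2 big_interval.1 merged_intervals

-- ===== PRECONDITION & SPEC =====
-- Pre_ excludes exactly the inputs where the Python A raises IndexError:
-- some merged interval has fewer than 2 elements (A reads iv[0] and iv[1] of every interval).
def Pre_find_uncovered_part (big_interval : Int × Int) (merged_intervals : List (List Int)) : Prop :=
  ∀ iv ∈ merged_intervals, 2 ≤ iv.length
instance (big_interval : Int × Int) (merged_intervals : List (List Int)) : Decidable (Pre_find_uncovered_part big_interval merged_intervals) := by unfold Pre_find_uncovered_part; infer_instance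

def pvWitness_find_uncovered_part : (Int × Int) × List (List Int) := ((0, 10), [[2, 3], [5, 7]])

def Spec_find_uncovered_part (big_interval : Int × Int) (merged_intervals : List (List Int)) (out : List (List Int)) : Prop := out = find_uncovered_part_alt big_interval merged_intervals
instance (big_interval : Int × Int) (merged_intervals : List (List Int)) (out : List (List Int)) : Decidable (Spec_find_uncovered_part big_interval merged_intervals out) := by unfold Spec_find_uncovered_part; infer_instance

-- ===== CLAIM (what is proved, stated in full; the proofs are below) =====
def Claim_equal_find_uncovered_part : Prop := ∀ (big_interval : Int × Int) (merged_intervals : List (List Int)), Dom_find_uncovered_part big_interval merged_intervals → Pre_find_uncovered_part big_interval merged_intervals → Spec_find_uncovered_part big_interval merged_intervals (find_uncovered_part big_interval merged_intervals)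

-- ===== LEMMAS AND PROOFS =====

-- interval start / end readers (shared shape of both ports' inner indexing)
def pvG0 (iv : List Int) : Int := PySem.List.pyGetD iv 0 0
def pvG1 (iv : List Int) : Int := PySem.List.pyGetD iv 1 0

-- A's interior loop, as a structural recursion on consecutive pairs
def pvMid (a : List Int) (m : List (List Int)) : List (List Int) :=
  match m with
  | [] => []
  | b :: rest => (if pvG1 a < pvG0 b then [[pvG1 a, pvG0 b]] else []) ++ pvMid b rest

lemma pv_fold_mid (rest : List (List Int)) (a : List Int) (acc : List (List Int)) :
    (List.range rest.length).foldl
      (fun acc k =>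
        if pvG1 ((a :: rest).getD k []) < pvG0 (rest.getD k []) then
          acc ++ [[pvG1 ((a :: rest).getD k []), pvG0 (rest.getD k [])]]
        else acc)
      acc
    = acc ++ pvMid a rest := by
  induction rest generalizing a acc with
  | nil => simp [pvMid]
  | cons b rest ih =>
    rw [List.length_cons, List.range_succ_eq_map]
    simp only [List.foldl_cons, List.foldl_map, List.getD_cons_zero, List.getD_cons_succ]
    rw [ih b]
    by_cases h : pvG1 a < pvG0 b <;> simp [pvMid, h]

lemma pv_mid_last (rest : List (List Int)) (a : List Int) (e : Int) :
    pvMid a rest ++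
      (if pvG1 ((a :: rest).getLast (List.cons_ne_nil a rest)) < e then
        [[pvG1 ((a :: rest).getLast (List.cons_ne_nil a rest)), e]]
      else []) = pvAltGaps e (pvG1 a) rest := by
  induction rest generalizing a with
  | nil => simp [pvMid, pvAltGaps, pvG0, pvG1]
  | cons b rest ih =>
    have hlast : (a :: b :: rest).getLast (List.cons_ne_nil a (b :: rest))
        = (b :: rest).getLast (List.cons_ne_nil b rest) := by
      simp [List.getLast_cons]
    rw [pvMid, hlast, List.append_assoc, ih b]
    simp [pvAltGaps, pvG0, pvG1]

lemma pvA_eq_gaps (bi : Int × Int) (a : List Int) (rest : List (List Int)) :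
    find_uncovered_part bi (a :: rest)
    = (if bi.1 < pvG0 a then [[bi.1, pvG0 a]] else []) ++ pvAltGaps bi.2 (pvG1 a) rest := by
  rw [← pv_mid_last rest a bi.2]
  unfold find_uncovered_part
  simp only [if_neg (List.cons_ne_nil a rest)]
  rw [PySem.List.pyRange_one]
  have hlen : (((a :: rest).length : Int) - 1).toNat = rest.length := by
    rw [List.length_cons]; omega
  rw [hlen, List.foldl_map]
  have hbody :
      (fun (acc : List (List Int)) (k : Nat) =>
        let prev_end := PySem.List.pyGetD (PySem.List.pyGetD (a :: rest) ((1 : Int) + (k : Int) - 1) []) 1 0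
        let current_start := PySem.List.pyGetD (PySem.List.pyGetD (a :: rest) ((1 : Int) + (k : Int)) []) 0 0
        if prev_end < current_start then acc ++ [[prev_end, current_start]] else acc)
      = (fun acc k =>
        if pvG1 ((a :: rest).getD k []) < pvG0 (rest.getD k []) then
          acc ++ [[pvG1 ((a :: rest).getD k []), pvG0 (rest.getD k [])]]
        else acc) := by
    funext acc k
    have h1 : (1 : Int) + (k : Int) - 1 = ((k : Nat) : Int) := by omega
    have h2 : (1 : Int) + (k : Int) = (((k + 1 : Nat)) : Int) := by omega
    rw [h1, h2]
    simp only [PySem.List.pyGetD_natCast, List.getD_cons_succ, pvG0, pvG1]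
  rw [hbody, pv_fold_mid rest a]
  have hneg : PySem.List.pyGetD (a :: rest) (-1) ([] : List Int)
      = (a :: rest).getLast (List.cons_ne_nil a rest) :=
    PySem.List.pyGetD_neg_one (a :: rest) [] (List.cons_ne_nil a rest)
  rw [hneg]
  simp only [PySem.List.pyGetD_zero_cons, pvG0, pvG1]
  split_ifs <;> simp

-- ===== VERDICT (by name: the statement is the Claim_ definition above) =====
theorem find_uncovered_part_spec : Claim_equal_find_uncovered_part := by
  intro bi m _ _
  unfold Spec_find_uncovered_part
  cases m with
  | nil => rfl
  | cons a rest =>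
    rw [pvA_eq_gaps]
    show _ = pvAltGaps bi.2 bi.1 (a :: rest)
    rw [pvAltGaps]
    simp [pvG0, pvG1]
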